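-- pv_equiv track=rewrite | github.com/sintri/CK3-Conflict-Helper | chm.py | getTotalCount
-- ===== SOURCE A (Python) =====
-- def getTotalCount(checkChar, checkString):
--     count = 0
--     ignorePound = False
--     for thisChar in checkString:
--         if thisChar == '"':
--             if ignorePound:
--                 ignorePound = False
--             else:
--                 ignorePound = True
--         if not ignorePound and thisChar == '#':
--             return count
--         if thisChar == checkChar:
--             count+=1
--     return count
-- ===== SOURCE B (Python) =====
-- def getTotalCount(checkChar, checkString):
--     # Pass 1: find the cutoff index of the first unquoted '#'
--     ignorePound = False
--     end = len(checkString)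
--     for i, thisChar in enumerate(checkString):
--         if thisChar == '"':
--             ignorePound = not ignorePound
--         if not ignorePound and thisChar == '#':
--             end = i
--             break
--     # Pass 2: frequency table of the prefix, then a single lookup
--     freq = {}
--     for thisChar in checkString[:end]:
--         freq[thisChar] = freq.get(thisChar, 0) + 1
--     return freq.get(checkChar, 0)
-- ===== Notes on version B (the rewrite author's own statement) =====
-- stated objective: alternative
-- what changed: A is one fused loop that both toggles the quote flag and accumulates the count with an early return; B separates the phases: a first pass finds the cutoff index of the first unquoted '#', a second pass builds a frequency dictionary of the prefix, and the answer is one dictionary lookup.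
import Mathlib
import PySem

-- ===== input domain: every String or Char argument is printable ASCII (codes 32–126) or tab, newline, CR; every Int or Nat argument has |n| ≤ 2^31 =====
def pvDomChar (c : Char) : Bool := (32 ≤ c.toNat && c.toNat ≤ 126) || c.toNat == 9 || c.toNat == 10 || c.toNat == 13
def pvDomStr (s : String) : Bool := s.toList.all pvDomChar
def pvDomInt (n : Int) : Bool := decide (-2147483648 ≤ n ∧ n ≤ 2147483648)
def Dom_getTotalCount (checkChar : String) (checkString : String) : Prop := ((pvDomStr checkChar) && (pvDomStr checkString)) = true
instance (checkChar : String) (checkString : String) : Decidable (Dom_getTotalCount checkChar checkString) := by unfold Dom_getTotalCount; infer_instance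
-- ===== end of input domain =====

-- B separates A's single fused loop into two phases: find the cutoff index of the
-- first unquoted '#', then count via a frequency dictionary of the prefix. Alternative
-- decomposition, same cost; return values proved equal on all inputs.

-- ===== PORT A =====
-- the for-loop of A: state = (count, ignorePound), early return at an unquoted '#'
def pvGoA (checkChar : String) : List Char → Int → Bool → Int
  | [], count, _ => count
  | c :: rest, count, ignorePound =>
    let ignorePound' := if c = '"' then (if ignorePound then false else true) else ignorePound
    if ignorePound' = false ∧ c = '#' then count
    else pvGoA checkChar rest (if String.ofList [c] = checkChar then count + 1 else count) ignorePound'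

def getTotalCount (checkChar : String) (checkString : String) : Int :=
  pvGoA checkChar checkString.toList 0 false

-- ===== PORT B =====
-- pass 1 of B: index of the first unquoted '#' (length if none) — the loop with break
def pvCutIdx : List Char → Bool → Nat
  | [], _ => 0
  | c :: rest, ignorePound =>
    let ignorePound' := if c = '"' then !ignorePound else ignorePound
    if ignorePound' = false ∧ c = '#' then 0 else pvCutIdx rest ignorePound' + 1

def getTotalCount_alt (checkChar : String) (checkString : String) : Int :=
  let cs := checkString.toList
  let endIdx := pvCutIdx cs false
  -- pass 2 of B: freq[c] = freq.get(c, 0) + 1 over checkString[:endIdx], then one lookup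
  let freq : PySem.Dict String Int :=
    (cs.take endIdx).foldl
      (fun d c => d.insert (String.ofList [c]) (d.getD (String.ofList [c]) 0 + 1)) PySem.Dict.empty
  freq.getD checkChar 0

-- ===== PRECONDITION & SPEC =====
def Spec_getTotalCount (checkChar : String) (checkString : String) (out : Int) : Prop := out = getTotalCount_alt checkChar checkString
instance (checkChar : String) (checkString : String) (out : Int) : Decidable (Spec_getTotalCount checkChar checkString out) := by unfold Spec_getTotalCount; infer_instance

-- ===== CLAIM (what is proved, stated in full; the proofs are below) =====
def Claim_equal_getTotalCount : Prop := ∀ (checkChar : String) (checkString : String), Dom_getTotalCount checkChar checkString → Spec_getTotalCount checkChar checkString (getTotalCount checkChar checkString)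

-- ===== LEMMAS AND PROOFS =====

-- A's fused loop equals: count the matching chars in the prefix cut at the first unquoted '#'
theorem pvGoA_eq_count (checkChar : String) (s : List Char) :
    ∀ (ip : Bool) (count : Int),
      pvGoA checkChar s count ip
        = count + (((s.take (pvCutIdx s ip)).map (fun c => String.ofList [c])).count checkChar : Int) := by
  induction s with
  | nil => intro ip count; simp [pvGoA, pvCutIdx]
  | cons c rest ih =>
    intro ip count
    simp only [pvGoA, pvCutIdx]
    by_cases hstop : (if c = '"' then !ip else ip) = false ∧ c = '#'
    · obtain ⟨h1, h2⟩ := hstop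
      subst h2
      have hip : ip = false := by simpa using h1
      subst hip
      simp
    · have hstop' : ¬ ((if c = '"' then (if ip then false else true) else ip) = false ∧ c = '#') := by
        cases ip <;> simpa using hstop
      have hii : (if c = '"' then (if ip then false else true) else ip)
          = (if c = '"' then !ip else ip) := by cases ip <;> simp
      simp only [hstop, hii, if_false]
      rw [ih]
      simp only [List.take_succ_cons, List.map_cons, List.count_cons]
      by_cases hc : String.ofList [c] = checkChar
      · simp [hc]; ring
      · simp [hc, beq_iff_eq]

-- B's fold builds Counter(prefix) keyed by singleton strings; lookup = List.count
theorem pvAlt_eq (checkChar : String) (checkString : String) :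
    getTotalCount_alt checkChar checkString
      = (((checkString.toList.take (pvCutIdx checkString.toList false)).map
            (fun c => String.ofList [c])).count checkChar : Int) := by
  show (List.foldl (fun (d : PySem.Dict String Int) c =>
          d.insert (String.ofList [c]) (d.getD (String.ofList [c]) 0 + 1)) PySem.Dict.empty
          (List.take (pvCutIdx checkString.toList false) checkString.toList)).getD checkChar 0 = _
  rw [show (fun (d : PySem.Dict String Int) (c : Char) =>
        d.insert (String.ofList [c]) (d.getD (String.ofList [c]) 0 + 1))
      = (fun (d : PySem.Dict String Int) (c : Char) =>
          (fun (d : PySem.Dict String Int) (x : String) => d.insert x (d.getD x 0 + 1)) d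
          ((fun c : Char => String.ofList [c]) c)) from rfl,
      ← List.foldl_map (f := fun c : Char => String.ofList [c])
        (g := fun (d : PySem.Dict String Int) x => d.insert x (d.getD x 0 + 1))
        (l := List.take (pvCutIdx checkString.toList false) checkString.toList)
        (init := PySem.Dict.empty)]
  rw [PySem.Dict.foldl_insert_getD_add_one_eq_counter, PySem.Dict.getD_counter]

-- ===== VERDICT (by name: the statement is the Claim_ definition above) =====
theorem getTotalCount_spec : Claim_equal_getTotalCount := by
  intro checkChar checkString _
  unfold Spec_getTotalCount getTotalCount
  rw [pvGoA_eq_count, pvAlt_eq]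
  simp
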